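-- pv_equiv track=rewrite | github.com/Z3ZEL/ecole | Info/CorrectionAnnale/annale2018.py | egalSommePrecedente
-- ===== SOURCE A (Python) =====
-- def egalSommePrecedente(L):
--     """
--     docstring
--     """
--     for i in range(len(L)):
--         s=0
--         for j in range(i):
--             s+=L[j]
--         if(s==L[i] and L[i]!=0):
--             return L[i]
--     return None
-- ===== SOURCE B (Python) =====
-- def egalSommePrecedente(L):
--     s = 0
--     for x in L:
--         if x == s and x != 0:
--             return x
--         s += x
--     return None
-- ===== Notes on version B (the rewrite author's own statement) =====
-- stated objective: faster
-- what changed: B keeps a single running prefix sum updated incrementally in one pass instead of recomputing the sum of predecessors from scratch for every index.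
import Mathlib
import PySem

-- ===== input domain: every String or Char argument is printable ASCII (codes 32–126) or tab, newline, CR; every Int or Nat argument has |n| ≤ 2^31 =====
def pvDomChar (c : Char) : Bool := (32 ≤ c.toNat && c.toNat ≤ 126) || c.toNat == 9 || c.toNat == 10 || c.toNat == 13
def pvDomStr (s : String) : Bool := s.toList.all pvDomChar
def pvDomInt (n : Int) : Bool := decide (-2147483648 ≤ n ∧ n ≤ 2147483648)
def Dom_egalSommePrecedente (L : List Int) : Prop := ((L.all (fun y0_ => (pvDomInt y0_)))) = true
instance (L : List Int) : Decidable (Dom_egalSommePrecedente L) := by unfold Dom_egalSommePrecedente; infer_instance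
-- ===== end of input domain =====

-- B replaces A's quadratic recomputation of the predecessor sum by one running prefix sum (single pass).

-- ===== PORT A =====
-- inner loop 'for j in range(i): s += L[j]' (j is always in range, so pyGetD's default is never used)
def pvAInner (L : List Int) (i : Nat) : Int :=
  (List.range i).foldl (fun s j => s + PySem.List.pyGetD L (Int.ofNat j) 0) 0

-- outer loop 'for i in range(len(L))' with early return, over the list of indices
def pvAGo (L : List Int) : List Nat → Option Int
  | [] => none
  | i :: rest =>
    let s := pvAInner L i
    let li := PySem.List.pyGetD L (Int.ofNat i) 0
    if s = li ∧ li ≠ 0 then some li else pvAGo L rest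

def egalSommePrecedente (L : List Int) : Option Int :=
  pvAGo L (List.range L.length)

-- ===== PORT B =====
def pvBGo : List Int → Int → Option Int
  | [], _ => none
  | x :: xs, s => if x = s ∧ x ≠ 0 then some x else pvBGo xs (s + x)

def egalSommePrecedente_alt (L : List Int) : Option Int :=
  pvBGo L 0

-- ===== PRECONDITION & SPEC =====
def Spec_egalSommePrecedente (L : List Int) (out : Option Int) : Prop := out = egalSommePrecedente_alt L
instance (L : List Int) (out : Option Int) : Decidable (Spec_egalSommePrecedente L out) := by unfold Spec_egalSommePrecedente; infer_instance

-- ===== CLAIM (what is proved, stated in full; the proofs are below) =====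
def Claim_equal_egalSommePrecedente : Prop := ∀ (L : List Int), Dom_egalSommePrecedente L → Spec_egalSommePrecedente L (egalSommePrecedente L)

-- ===== LEMMAS AND PROOFS =====

-- A's inner loop computes the sum of the first i elements
theorem pvAInner_eq_take_sum (L : List Int) (i : Nat) (h : i ≤ L.length) :
    pvAInner L i = (L.take i).sum := by
  induction i with
  | zero => simp [pvAInner]
  | succ n ih =>
    have hn : n < L.length := by omega
    have : pvAInner L (n + 1) = pvAInner L n + L[n] := by
      simp [pvAInner, List.range_succ, PySem.List.pyGetD_natCast, List.getD, hn]
    rw [this, ih (by omega), List.sum_take_succ L n hn]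
theorem pvA_eq_pvB (P L : List Int) :
    pvAGo (P ++ L) (List.range' P.length L.length) = pvBGo L P.sum := by
  induction L generalizing P with
  | nil => simp [pvAGo, pvBGo]
  | cons x xs ih =>
    have hr : List.range' P.length (x :: xs).length = P.length :: List.range' (P.length + 1) xs.length := by
      simp [List.range'_succ]
    rw [hr]
    simp only [pvAGo, pvBGo]
    have hs : pvAInner (P ++ x :: xs) P.length = P.sum := by
      rw [pvAInner_eq_take_sum _ _ (by simp)]
      simp
    have hget : PySem.List.pyGetD (P ++ x :: xs) (Int.ofNat P.length) 0 = x := by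
      have : Int.ofNat P.length = ((P.length : Nat) : Int) := rfl
      rw [this, PySem.List.pyGetD_natCast]
      simp [List.getD]
    rw [hs, hget]
    by_cases hc : P.sum = x ∧ x ≠ 0
    · simp [hc]
    · have hc' : ¬ (x = P.sum ∧ x ≠ 0) := by tauto
      simp only [if_neg hc, if_neg hc']
      have := ih (P ++ [x])
      simpa using this

-- ===== VERDICT (by name: the statement is the Claim_ definition above) =====
theorem egalSommePrecedente_spec : Claim_equal_egalSommePrecedente := by
  intro L _
  unfold Spec_egalSommePrecedente egalSommePrecedente egalSommePrecedente_alt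
  have := pvA_eq_pvB [] L
  simpa [List.range_eq_range'] using this
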